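-- pv_equiv track=rewrite | github.com/ALTA-DE2-Winardi-10April1997/Basic-Programming-Part4 | problem2/main.py | draw_xyz
-- ===== SOURCE A (Python) =====
-- def draw_xyz(N):
--     x = 1
--     pattern = ""
--     for i in range(1, N+1):
--         row = ""
--         for j in range(1, N+1):
--             nilai = str(x)
--             if int(nilai) % 3 == 0:
--                 row += "X "
--             elif int(nilai) % 2 == 0:
--                 row += "Z "
--             else:
--                 row += "Y "
--             x += 1
--         pattern += row + "\n"
--     return pattern
-- ===== SOURCE B (Python) =====
-- def draw_xyz(N):
--     # flat sequence of cell strings for values 1..n*n, via a fixed mod-6 table,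
--     # then reshaped into rows of n cells (n = N clamped at 0: no rows for N <= 0)
--     n = max(N, 0)
--     table = "XYZXZY"
--     flat = [table[v % 6] + " " for v in range(1, n * n + 1)]
--     return "".join("".join(flat[r * n:(r + 1) * n]) + "\n" for r in range(n))
-- ===== Notes on version B (the rewrite author's own statement) =====
-- stated objective: simpler
-- what changed: Replaces the nested accumulator loops with a mutable running counter by computing the flat sequence of N*N cell characters via a fixed mod-6 lookup table and reshaping it into rows by slicing chunks of N.
import Mathlib
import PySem

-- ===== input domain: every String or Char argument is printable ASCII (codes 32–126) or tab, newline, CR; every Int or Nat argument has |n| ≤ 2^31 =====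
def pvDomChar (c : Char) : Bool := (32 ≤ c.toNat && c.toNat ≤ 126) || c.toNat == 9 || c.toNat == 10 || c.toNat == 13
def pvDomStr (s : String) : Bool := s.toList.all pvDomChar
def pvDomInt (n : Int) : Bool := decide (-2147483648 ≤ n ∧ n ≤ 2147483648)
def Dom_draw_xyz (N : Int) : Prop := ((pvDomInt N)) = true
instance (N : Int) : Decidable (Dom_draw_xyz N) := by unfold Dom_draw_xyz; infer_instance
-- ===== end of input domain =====

-- B drops A's mutable running counter: it maps 1..N*N through a fixed mod-6 table and reshapes
-- the flat list into rows by slicing chunks of N (objective: simpler).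

-- ===== PORT A =====
-- inner loop body: one cell appended to `row`, counter `x` advanced
def drawA_innerStep (st : Int × List Char) (_j : Int) : Int × List Char :=
  let x := st.1
  let row := st.2
  let nilai := PySem.Int.toChars x
  -- int(nilai): CPython's int(str(x)) returns exactly x; ported by hand as x (exact there),
  -- since PySem has no round-trip lemma for ofChars?/toChars
  let v : Int := x
  let _ := nilai
  let row := if PySem.Int.mod v 3 = 0 then row ++ ['X', ' ']
             else if PySem.Int.mod v 2 = 0 then row ++ ['Z', ' ']
             else row ++ ['Y', ' ']
  (x + 1, row)

-- outer loop body: build one row with the inner loop, append it plus "\n"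
def drawA_outerStep (N : Int) (st : Int × List Char) (_i : Int) : Int × List Char :=
  let inner := (PySem.List.pyRange 1 (N + 1) 1).foldl drawA_innerStep (st.1, [])
  (inner.1, st.2 ++ inner.2 ++ ['\n'])

def draw_xyz (N : Int) : String :=
  String.ofList ((PySem.List.pyRange 1 (N + 1) 1).foldl (drawA_outerStep N) (1, [])).2

-- ===== PORT B =====
def draw_xyz_alt (N : Int) : String :=
  let m : Int := max N 0
  let table : List Char := ['X', 'Y', 'Z', 'X', 'Z', 'Y']
  let flat : List (List Char) :=
    (PySem.List.pyRange 1 (m * m + 1) 1).map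
      (fun v => [PySem.List.pyGetD table (PySem.Int.mod v 6) ' ', ' '])
  String.ofList
    (((PySem.List.pyRange 0 m 1).map
        (fun r => (PySem.List.slice flat (some (r * m)) (some ((r + 1) * m))).flatten ++ ['\n'])).flatten)

-- ===== PRECONDITION & SPEC =====
def Spec_draw_xyz (N : Int) (out : String) : Prop := out = draw_xyz_alt N
instance (N : Int) (out : String) : Decidable (Spec_draw_xyz N out) := by unfold Spec_draw_xyz; infer_instance

-- ===== CLAIM (what is proved, stated in full; the proofs are below) =====
def Claim_equal_draw_xyz : Prop := ∀ (N : Int), Dom_draw_xyz N → Spec_draw_xyz N (draw_xyz N)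

-- ===== LEMMAS AND PROOFS =====

-- the cell A prints for counter value v
def pvCell (v : Int) : List Char :=
  if PySem.Int.mod v 3 = 0 then ['X', ' ']
  else if PySem.Int.mod v 2 = 0 then ['Z', ' ']
  else ['Y', ' ']

-- B's table lookup agrees with A's branch cascade
lemma pvCell_eq (v : Int) :
    [PySem.List.pyGetD (['X', 'Y', 'Z', 'X', 'Z', 'Y'] : List Char) (PySem.Int.mod v 6) ' ', ' ']
      = pvCell v := by
  have h6 : PySem.Int.mod v 6 = v % 6 := PySem.Int.mod_eq_emod_of_pos (by omega)
  have h3 : PySem.Int.mod v 3 = v % 3 := PySem.Int.mod_eq_emod_of_pos (by omega)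
  have h2 : PySem.Int.mod v 2 = v % 2 := PySem.Int.mod_eq_emod_of_pos (by omega)
  have e3 : v % 3 = v % 6 % 3 := (Int.emod_emod_of_dvd v (by norm_num)).symm
  have e2 : v % 2 = v % 6 % 2 := (Int.emod_emod_of_dvd v (by norm_num)).symm
  have hb : 0 ≤ v % 6 ∧ v % 6 < 6 :=
    ⟨Int.emod_nonneg v (by norm_num), Int.emod_lt_of_pos v (by norm_num)⟩
  unfold pvCell
  rw [h6, h3, h2, e3, e2]
  obtain ⟨hb1, hb2⟩ := hb
  interval_cases h : (v % 6) <;> decide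

-- one row of cells: counter values x0, x0+1, …, x0+k-1
def pvRow (x0 : Int) (k : Nat) : List Char :=
  ((List.range k).map (fun (j : Nat) => pvCell (x0 + (j : Int)))).flatten

-- k rows of w cells each, counters starting at x0
def pvGrid (x0 : Int) (w : Nat) (k : Nat) : List Char :=
  ((List.range k).map (fun (i : Nat) => pvRow (x0 + (i : Int) * (w : Int)) w ++ ['\n'])).flatten

-- a chunk of a map over range: drop a, take b
lemma pvChunk (a b m : Nat) (f : Nat → List Char) (h : a + b ≤ m) :
    (((List.range m).map f).drop a).take b = (List.range b).map (fun j => f (a + j)) := by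
  rw [← List.map_drop, ← List.map_take, List.range_eq_range', List.drop_range',
      List.take_range'_of_length_ge (by omega), List.range'_eq_map_range, List.map_map]
  simp [Function.comp]

lemma pvRow_succ (x0 : Int) (k : Nat) : pvRow x0 (k + 1) = pvCell x0 ++ pvRow (x0 + 1) k := by
  unfold pvRow
  rw [List.range_succ_eq_map, List.map_cons, List.flatten_cons, List.map_map]
  congr 2
  · norm_num
  · apply List.map_congr_left
    intro j _
    simp only [Function.comp]
    congr 1
    push_cast
    ring

lemma pvGrid_succ (x0 : Int) (w k : Nat) :
    pvGrid x0 w (k + 1) = (pvRow x0 w ++ ['\n']) ++ pvGrid (x0 + w) w k := by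
  unfold pvGrid
  rw [List.range_succ_eq_map, List.map_cons, List.flatten_cons, List.map_map]
  congr 2
  · norm_num
  · apply List.map_congr_left
    intro i _
    simp only [Function.comp]
    congr 2
    push_cast
    ring

lemma pvA_inner (l : List Int) : ∀ (x0 : Int) (row : List Char),
    l.foldl drawA_innerStep (x0, row) = (x0 + l.length, row ++ pvRow x0 l.length) := by
  induction l with
  | nil => intro x0 row; simp [pvRow]
  | cons a l ih =>
    intro x0 row
    have hstep : drawA_innerStep (x0, row) a = (x0 + 1, row ++ pvCell x0) := by
      simp only [drawA_innerStep, pvCell]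
      split_ifs <;> rfl
    rw [List.foldl_cons, hstep, ih]
    refine Prod.ext ?_ ?_
    · simp only [List.length_cons]; push_cast; ring
    · simp only [List.length_cons, pvRow_succ, List.append_assoc]

lemma pvA_outer (N : Int) (l : List Int) : ∀ (x0 : Int) (pat : List Char),
    l.foldl (drawA_outerStep N) (x0, pat)
      = (x0 + l.length * (N.toNat : Int), pat ++ pvGrid x0 N.toNat l.length) := by
  have hlen : (PySem.List.pyRange 1 (N + 1) 1).length = N.toNat := by
    rw [PySem.List.length_pyRange_one]; congr 1; omega
  induction l with
  | nil => intro x0 pat; simp [pvGrid]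
  | cons a l ih =>
    intro x0 pat
    have hstep : drawA_outerStep N (x0, pat) a
        = (x0 + (N.toNat : Int), pat ++ (pvRow x0 N.toNat ++ ['\n'])) := by
      simp only [drawA_outerStep, pvA_inner, hlen, List.append_assoc, List.nil_append]
    rw [List.foldl_cons, hstep, ih]
    refine Prod.ext ?_ ?_
    · simp only [List.length_cons]; push_cast; ring
    · simp only [List.length_cons, pvGrid_succ, List.append_assoc]

-- ===== VERDICT (by name: the statement is the Claim_ definition above) =====
theorem draw_xyz_spec : Claim_equal_draw_xyz := by
  intro N _
  unfold Spec_draw_xyz draw_xyz draw_xyz_alt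
  by_cases hN : N ≤ 0
  · rw [PySem.List.pyRange_one_eq_nil (by omega : (N:Int) + 1 ≤ 1)]
    simp only [show max N 0 = 0 from by omega]
    rw [PySem.List.pyRange_one_eq_nil (by omega : (0:Int) ≤ 0)]
    simp
  · rw [not_le] at hN
    set n : Nat := N.toNat with hn
    have hNn : N = (n : Int) := by omega
    have hlen : (PySem.List.pyRange 1 (N + 1) 1).length = n := by
      rw [PySem.List.length_pyRange_one]; omega
    simp only [show max N 0 = N from by omega]
    rw [pvA_outer, hlen]
    have hflat : (PySem.List.pyRange 1 (N * N + 1) 1).map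
        (fun v => [PySem.List.pyGetD (['X','Y','Z','X','Z','Y'] : List Char) (PySem.Int.mod v 6) ' ', ' '])
        = (List.range (n * n)).map (fun (k : Nat) => pvCell (1 + (k : Int))) := by
      rw [PySem.List.pyRange_one, List.map_map]
      have hnn : ((N * N + 1 - 1).toNat) = n * n := by
        rw [hNn]; omega
      rw [hnn]
      apply List.map_congr_left
      intro k _
      simp only [Function.comp]
      exact pvCell_eq _
    simp only [hflat, List.nil_append]
    congr 1
    unfold pvGrid
    rw [hNn, PySem.List.pyRange_zero_nat, List.map_map]
    congr 1
    apply List.map_congr_left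
    intro i hi
    simp only [Function.comp]
    rw [List.mem_range] at hi
    congr 1
    have h1 : ((i : Int) * ((n : Nat) : Int)) = ((i * n : Nat) : Int) := by push_cast; ring
    have h2 : (((i : Int) + 1) * ((n : Nat) : Int)) = ((i * n : Nat) : Int) + ((n : Nat) : Int) := by
      push_cast; ring
    rw [h1, h2, PySem.List.slice_natCast_add, Int.toNat_natCast,
        pvChunk (i * n) n (n * n) _ (by nlinarith)]
    unfold pvRow
    congr 1
    apply List.map_congr_left
    intro j _
    congr 1
    push_cast
    ring
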